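-- pv_equiv track=rewrite | github.com/Lan238692/quantum_circuit_synthesis | main.py | btinsert
-- ===== SOURCE A (Python) =====
-- def btinsert(a, x):
--     hi = len(a)
--     if hi == 0:
--         a.insert(0, x)
--         return True
--     lo = 0
--     while lo < hi:
--         mid = (lo+hi)//2
--         if a[mid] < x: lo = mid+1
--         elif x < a[mid]: hi = mid
--         else: return False
--     a.insert(lo, x)
--     return True
-- ===== SOURCE B (Python) =====
-- def btinsert(a, x):
--     i = 0
--     n = len(a)
--     while i < n and a[i] < x:
--         i += 1
--     if i < n and not (x < a[i]):
--         return False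
--     a.insert(i, x)
--     return True
-- ===== Notes on version B (the rewrite author's own statement) =====
-- stated objective: simpler
-- what changed: a single forward linear scan using only < replaces the binary bisection loop (no lo/hi/mid arithmetic); duplicate detection and insert position fall out of the scan index.
-- outside the precondition, e.g. on btinsert([3, 1], 1): A returns False, B returns True
import Mathlib
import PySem

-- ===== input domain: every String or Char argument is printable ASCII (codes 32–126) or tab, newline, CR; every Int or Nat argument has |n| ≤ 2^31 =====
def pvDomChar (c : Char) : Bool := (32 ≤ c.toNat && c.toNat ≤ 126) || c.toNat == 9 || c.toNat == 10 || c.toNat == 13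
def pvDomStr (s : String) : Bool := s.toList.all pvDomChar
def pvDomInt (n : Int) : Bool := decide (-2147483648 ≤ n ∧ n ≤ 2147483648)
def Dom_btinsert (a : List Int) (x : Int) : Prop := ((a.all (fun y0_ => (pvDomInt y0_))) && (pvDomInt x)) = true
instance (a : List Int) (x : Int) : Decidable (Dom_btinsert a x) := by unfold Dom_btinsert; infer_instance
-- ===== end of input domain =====

-- B replaces the binary bisection with a single forward linear scan using only `<`.
-- Both A and B also insert x into the list in place when it is absent; the
-- equivalence proved here is about the RETURN value only (on sorted input the
-- mutation is the same insertion position as well, but that is not stated).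

-- ===== PORT A =====
-- the while loop of A: recursion on (lo, hi); a[mid] is in range whenever lo < hi ≤ a.length
def btGo (a : List Int) (x : Int) (lo hi : Nat) : Bool :=
  if h : lo < hi then
    let mid := (lo + hi) / 2
    let v := a.getD mid 0
    if v < x then btGo a x (mid + 1) hi
    else if x < v then btGo a x lo mid
    else false
  else true
termination_by hi - lo
decreasing_by all_goals omega

def btinsert (a : List Int) (x : Int) : Bool :=
  if a.length = 0 then true
  else btGo a x 0 a.length

-- ===== PORT B =====
-- the while loop of B: advance i while i < len a and a[i] < x
def altFind (a : List Int) (x : Int) (i : Nat) : Nat :=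
  if h : i < a.length ∧ a.getD i 0 < x then altFind a x (i + 1) else i
termination_by a.length - i
decreasing_by omega

def btinsert_alt (a : List Int) (x : Int) : Bool :=
  let i := altFind a x 0
  if i < a.length ∧ ¬ (x < a.getD i 0) then false else true

-- ===== PRECONDITION & SPEC =====
-- Pre_ excludes unsorted lists that already contain x: btinsert is a sorted-insert
-- (the bisection assumes order), and on such input whether A even notices the duplicate
-- is an artefact of the particular probe path of its bisection, which no linear scan matches.
-- (When x is absent the duplicate branch of neither program can fire, so sortedness is not needed.)
def Pre_btinsert (a : List Int) (x : Int) : Prop := a.Pairwise (· ≤ ·) ∨ x ∉ a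
instance (a : List Int) (x : Int) : Decidable (Pre_btinsert a x) := by unfold Pre_btinsert; infer_instance
def pvWitness_btinsert : List Int × Int := ([1, 3, 3, 7], 3)

def Spec_btinsert (a : List Int) (x : Int) (out : Bool) : Prop := out = btinsert_alt a x
instance (a : List Int) (x : Int) (out : Bool) : Decidable (Spec_btinsert a x out) := by unfold Spec_btinsert; infer_instance

-- ===== CLAIM (what is proved, stated in full; the proofs are below) =====
def Claim_equal_btinsert : Prop := ∀ (a : List Int) (x : Int), Dom_btinsert a x → Pre_btinsert a x → Spec_btinsert a x (btinsert a x)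

-- ===== LEMMAS AND PROOFS =====

-- On a sorted list, the bisection loop returns false exactly when x occurs in a,
-- given the invariant: everything left of lo is < x, everything from hi on is > x.
lemma btGo_eq_not_mem (a : List Int) (x : Int) (hs : a.Pairwise (· ≤ ·)) :
    ∀ n lo hi, hi - lo = n → hi ≤ a.length →
    (∀ i, i < lo → i < a.length → a.getD i 0 < x) →
    (∀ i, hi ≤ i → i < a.length → x < a.getD i 0) →
    btGo a x lo hi = !decide (x ∈ a) := by
  have hmono : ∀ i j, i < a.length → j < a.length → i ≤ j → a.getD i 0 ≤ a.getD j 0 := by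
    intro i j hi hj hij
    rw [List.getD_eq_getElem a 0 hi, List.getD_eq_getElem a 0 hj]
    rcases Nat.lt_or_ge i j with h | h
    · exact (List.pairwise_iff_getElem.mp hs) i j hi hj h
    · have : i = j := by omega
      subst this; exact le_refl _
  intro n
  induction n using Nat.strong_induction_on with
  | _ n ih =>
    intro lo hi hn hlen h1 h2
    unfold btGo
    by_cases hlt : lo < hi
    · simp only [hlt, dite_true]
      set mid := (lo + hi) / 2 with hmid
      have hmlt : mid < a.length := by omega
      by_cases hv1 : a.getD mid 0 < x
      · simp only [hv1, if_true]
        exact ih (hi - (mid + 1)) (by omega) (mid + 1) hi rfl hlen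
          (fun i hil hia => lt_of_le_of_lt (hmono i mid hia hmlt (by omega)) hv1) h2
      · simp only [hv1, if_false]
        by_cases hv2 : x < a.getD mid 0
        · simp only [hv2, if_true]
          exact ih (mid - lo) (by omega) lo mid rfl (by omega) h1
            (fun i hil hia => lt_of_lt_of_le hv2 (hmono mid i hmlt hia hil))
        · simp only [hv2, if_false]
          have hx : x ∈ a := by
            have : a.getD mid 0 = x := by omega
            rw [List.getD_eq_getElem a 0 hmlt] at this
            exact this ▸ List.getElem_mem hmlt
          simp [hx]
    · simp only [hlt, dite_false]
      have hnm : x ∉ a := by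
        intro hx
        rcases List.mem_iff_getElem.mp hx with ⟨i, hia, hval⟩
        have hval' : a.getD i 0 = x := by rw [List.getD_eq_getElem a 0 hia]; exact hval
        rcases Nat.lt_or_ge i lo with h | h
        · have := h1 i h hia; omega
        · have := h2 i (by omega) hia; omega
      simp [hnm]

-- The scan loop of B: everything before the returned index is < x, and it stops
-- either at the end of the list or at the first element not < x.
lemma altFind_spec (a : List Int) (x : Int) :
    ∀ n i, a.length - i = n →
    (∀ j, j < i → j < a.length → a.getD j 0 < x) →
    (∀ j, j < altFind a x i → j < a.length → a.getD j 0 < x) ∧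
      (a.length ≤ altFind a x i ∨ ¬ a.getD (altFind a x i) 0 < x) := by
  intro n
  induction n using Nat.strong_induction_on with
  | _ n ih =>
    intro i hn hinv
    unfold altFind
    by_cases h : i < a.length ∧ a.getD i 0 < x
    · simp only [h, and_self, dite_true]
      exact ih (a.length - (i + 1)) (by omega) (i + 1) rfl
        (fun j hj hja => by
          rcases Nat.lt_or_ge j i with hji | hji
          · exact hinv j hji hja
          · have : j = i := by omega
            subst this; exact h.2)
    · simp only [h, dite_false]
      refine ⟨hinv, ?_⟩
      rcases Nat.lt_or_ge i a.length with hi | hi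
      · right; intro hlt; exact h ⟨hi, hlt⟩
      · left; exact hi

-- On a sorted list B's return value is "x does not occur in a".
lemma alt_eq_not_mem (a : List Int) (x : Int) (hs : a.Pairwise (· ≤ ·)) :
    btinsert_alt a x = !decide (x ∈ a) := by
  have hmono : ∀ i j, i < a.length → j < a.length → i ≤ j → a.getD i 0 ≤ a.getD j 0 := by
    intro i j hi hj hij
    rw [List.getD_eq_getElem a 0 hi, List.getD_eq_getElem a 0 hj]
    rcases Nat.lt_or_ge i j with h | h
    · exact (List.pairwise_iff_getElem.mp hs) i j hi hj h
    · have : i = j := by omega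
      subst this; exact le_refl _
  obtain ⟨hbefore, hstop⟩ := altFind_spec a x a.length 0 rfl (fun j hj _ => absurd hj (Nat.not_lt_zero j))
  unfold btinsert_alt
  set k := altFind a x 0 with hk
  by_cases hc : k < a.length ∧ ¬ x < a.getD k 0
  · have hkx : a.getD k 0 = x := by
      rcases hstop with h | h
      · omega
      · omega
    have hx : x ∈ a := by
      rw [List.getD_eq_getElem a 0 hc.1] at hkx
      exact hkx ▸ List.getElem_mem hc.1
    rw [if_pos hc]
    simp [hx]
  · have hnm : x ∉ a := by
      intro hx
      rcases List.mem_iff_getElem.mp hx with ⟨i, hia, hval⟩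
      have hval' : a.getD i 0 = x := by rw [List.getD_eq_getElem a 0 hia]; exact hval
      rcases Nat.lt_or_ge i k with h | h
      · have := hbefore i h hia; omega
      · have hklen : k < a.length := by omega
        have hxk : x < a.getD k 0 := by
          by_contra hnot
          exact hc ⟨hklen, hnot⟩
        have := hmono k i hklen hia h
        omega
    rw [if_neg hc]
    simp [hnm]

-- If x does not occur in a, the bisection can never hit an equal element, so A's loop runs to completion and returns true.
lemma btGo_true_of_not_mem (a : List Int) (x : Int) (hnm : x ∉ a) :
    ∀ n lo hi, hi - lo = n → hi ≤ a.length → btGo a x lo hi = true := by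
  intro n
  induction n using Nat.strong_induction_on with
  | _ n ih =>
    intro lo hi hn hlen
    unfold btGo
    by_cases hlt : lo < hi
    · simp only [hlt, dite_true]
      set mid := (lo + hi) / 2 with hmid
      have hmlt : mid < a.length := by omega
      by_cases hv1 : a.getD mid 0 < x
      · simp only [hv1, if_true]
        exact ih (hi - (mid + 1)) (by omega) (mid + 1) hi rfl hlen
      · simp only [hv1, if_false]
        by_cases hv2 : x < a.getD mid 0
        · simp only [hv2, if_true]
          exact ih (mid - lo) (by omega) lo mid rfl (by omega)
        · exfalso
          have : a.getD mid 0 = x := by omega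
          rw [List.getD_eq_getElem a 0 hmlt] at this
          exact hnm (this ▸ List.getElem_mem hmlt)
    · simp [hlt]

-- If x does not occur in a, B's duplicate check after the scan cannot fire either.
lemma alt_true_of_not_mem (a : List Int) (x : Int) (hnm : x ∉ a) :
    btinsert_alt a x = true := by
  obtain ⟨hbefore, hstop⟩ := altFind_spec a x a.length 0 rfl (fun j hj _ => absurd hj (Nat.not_lt_zero j))
  unfold btinsert_alt
  set k := altFind a x 0 with hk
  rw [if_neg]
  rintro ⟨hklen, hxk⟩
  have hkx : a.getD k 0 = x := by
    rcases hstop with h | h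
    · omega
    · omega
  rw [List.getD_eq_getElem a 0 hklen] at hkx
  exact hnm (hkx ▸ List.getElem_mem hklen)

-- ===== VERDICT (by name: the statement is the Claim_ definition above) =====
theorem btinsert_spec : Claim_equal_btinsert := by
  intro a x _hdom hpre
  rcases hpre with hpre | hnm
  case inr =>
    unfold Spec_btinsert btinsert
    rw [alt_true_of_not_mem a x hnm]
    by_cases h0 : a.length = 0
    · rw [if_pos h0]
    · rw [if_neg h0]
      exact btGo_true_of_not_mem a x hnm a.length 0 a.length rfl le_rfl
  unfold Spec_btinsert btinsert
  by_cases h0 : a.length = 0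
  · have : a = [] := List.length_eq_zero_iff.mp h0
    subst this
    simp [h0, btinsert_alt, altFind]
  · rw [if_neg h0, btGo_eq_not_mem a x hpre a.length 0 a.length rfl le_rfl
      (fun i hi _ => absurd hi (Nat.not_lt_zero i)) (fun i hi hia => by omega),
      alt_eq_not_mem a x hpre]
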